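-- pv_equiv track=rewrite | github.com/liupengsay/PyIsTheBestLang | src/dp/bag_dp.py | group_bag_limited
-- ===== SOURCE A (Python) =====
-- from math import inf
--
-- def group_bag_limited(n, d, nums):
--     # 分组背包（以一维有限背包为例）计算出租车的最小花费
--     pre = [inf] * (n + 1)
--     pre[0] = 0
--     for r, z in nums:
--         cur = pre[:]  # 关键在于这里需要分组背包
--         for x in range(1, z + 1):
--             cost = d + x * r
--             for i in range(n, x - 1, -1):
--                 if pre[i - x] + cost < cur[i]:
--                     cur[i] = pre[i - x] + cost
--         pre = cur[:]
--     if pre[n] < inf: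
--         return pre[n]
--     return -1
-- ===== SOURCE B (Python) =====
-- from math import inf
--
-- def group_bag_limited(n, d, nums):
--     # Sliding-window minimum over pre[j] - j*r via block prefix/suffix minima:
--     # O(n) per group instead of O(z*n).
--     pre = [inf] * (n + 1)
--     pre[0] = 0
--     for r, z in nums:
--         if z <= 0:
--             continue
--         key = [pre[j] - j * r for j in range(n)]
--         premin = []
--         for j in range(n):
--             if j % z == 0:
--                 premin.append(key[j])
--             else:
--                 premin.append(min(premin[-1], key[j]))
--         suf = []
--         for j in range(n - 1, -1, -1):
--             if j == n - 1 or (j + 1) % z == 0: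
--                 suf.append(key[j])
--             else:
--                 suf.append(min(suf[-1], key[j]))
--         sufmin = suf[::-1]
--         cur = [pre[0]]
--         for i in range(1, n + 1):
--             l = i - z if i > z else 0
--             if l % z == 0:
--                 w = premin[i - 1]
--             else:
--                 w = min(sufmin[l], premin[i - 1])
--             cur.append(min(pre[i], w + d + i * r))
--         pre = cur
--     return pre[n] if pre[n] < inf else -1
-- ===== Notes on version B (the rewrite author's own statement) =====
-- stated objective: faster
-- what changed: A relaxes every copy count x=1..z against every capacity (O(z*n) per group); B rewrites the group transition as a sliding-window minimum of pre[j]-j*r and computes each window minimum in O(1) from block prefix/suffix minima, so each group costs O(n).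
import Mathlib
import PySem

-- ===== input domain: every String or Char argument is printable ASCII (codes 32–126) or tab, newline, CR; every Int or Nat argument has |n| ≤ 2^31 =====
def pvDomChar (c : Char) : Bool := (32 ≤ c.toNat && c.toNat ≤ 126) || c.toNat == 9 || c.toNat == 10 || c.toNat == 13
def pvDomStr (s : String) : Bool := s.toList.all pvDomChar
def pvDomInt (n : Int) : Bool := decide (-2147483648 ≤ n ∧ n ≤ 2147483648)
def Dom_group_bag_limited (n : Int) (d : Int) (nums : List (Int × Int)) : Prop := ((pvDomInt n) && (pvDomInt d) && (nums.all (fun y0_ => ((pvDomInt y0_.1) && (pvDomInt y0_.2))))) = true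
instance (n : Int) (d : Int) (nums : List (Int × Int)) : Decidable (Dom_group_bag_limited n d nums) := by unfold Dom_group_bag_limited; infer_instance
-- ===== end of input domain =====

-- B replaces A's inner O(z·n) bounded-group relaxation by an O(n) sliding-window minimum of
-- pre[j] - j*r (block prefix/suffix minima); return values are proved identical on Pre_ (0 ≤ n).

-- Shared cell helpers: a DP cell is `Option Int`, `none` = math.inf.
def ogd (xs : List (Option Int)) (i : Int) : Option Int := PySem.List.pyGetD xs i none
-- a + c / a - c on a possibly-infinite cell (inf + finite = inf)
def oadd (a : Option Int) (c : Int) : Option Int := a.map (fun v => v + c)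
def osub (a : Option Int) (c : Int) : Option Int := a.map (fun v => v - c)
-- Python `a < b` with inf
def olt : Option Int → Option Int → Bool
  | none, _ => false
  | some _, none => true
  | some a, some b => decide (a < b)
-- Python `min(a, b)` with inf
def omin : Option Int → Option Int → Option Int
  | none, b => b
  | some a, none => some a
  | some a, some b => some (min a b)

-- ===== PORT A =====
-- body of `for r, z in nums` in A: bounded relaxation over copy counts x and capacities i
def itemA (n d : Int) (pre : List (Option Int)) (rz : Int × Int) : List (Option Int) :=
  (PySem.List.pyRange 1 (rz.2 + 1) 1).foldl (fun cur x =>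
    let cost := d + x * rz.1
    (PySem.List.pyRange n (x - 1) (-1)).foldl (fun cur i =>
      let v := oadd (ogd pre (i - x)) cost
      if olt v (ogd cur i) then PySem.List.pySetD cur i v else cur) cur) pre

def group_bag_limited (n : Int) (d : Int) (nums : List (Int × Int)) : Int :=
  let pre0 : List (Option Int) :=
    PySem.List.pySetD (List.replicate (n + 1).toNat (none : Option Int)) 0 (some 0)
  let pre := nums.foldl (itemA n d) pre0
  match ogd pre n with
  | some v => v
  | none => -1

-- ===== PORT B =====
-- body of `for r, z in nums` in B: O(n) sliding-window minimum via block prefix/suffix minima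
def itemB (n d : Int) (pre : List (Option Int)) (rz : Int × Int) : List (Option Int) :=
  let r := rz.1
  let z := rz.2
  if z ≤ 0 then pre
  else
    let key := (PySem.List.pyRange 0 n 1).map (fun j => osub (ogd pre j) (j * r))
    let premin := (PySem.List.pyRange 0 n 1).foldl (fun acc j =>
      if PySem.Int.mod j z == 0 then acc ++ [ogd key j]
      else acc ++ [omin (ogd acc (-1)) (ogd key j)]) []
    let suf := (PySem.List.pyRange (n - 1) (-1) (-1)).foldl (fun acc j =>
      if (j == n - 1) || (PySem.Int.mod (j + 1) z == 0) then acc ++ [ogd key j]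
      else acc ++ [omin (ogd acc (-1)) (ogd key j)]) []
    -- suf[::-1] is List.reverse (PySem.List.slice?_none_none_neg_one)
    let sufmin := suf.reverse
    (PySem.List.pyRange 1 (n + 1) 1).foldl (fun acc i =>
      let l := if z < i then i - z else 0
      let w := if PySem.Int.mod l z == 0 then ogd premin (i - 1)
               else omin (ogd sufmin l) (ogd premin (i - 1))
      acc ++ [omin (ogd pre i) (oadd w (d + i * r))]) [ogd pre 0]

def group_bag_limited_alt (n : Int) (d : Int) (nums : List (Int × Int)) : Int :=
  let pre0 : List (Option Int) :=
    PySem.List.pySetD (List.replicate (n + 1).toNat (none : Option Int)) 0 (some 0)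
  let pre := nums.foldl (itemB n d) pre0
  match ogd pre n with
  | some v => v
  | none => -1

-- ===== PRECONDITION & SPEC =====
-- Pre_ excludes n < 0, on which the Python A raises IndexError at `pre[0] = 0`.
def Pre_group_bag_limited (n : Int) (d : Int) (nums : List (Int × Int)) : Prop := 0 ≤ n
instance (n : Int) (d : Int) (nums : List (Int × Int)) : Decidable (Pre_group_bag_limited n d nums) := by unfold Pre_group_bag_limited; infer_instance

def pvWitness_group_bag_limited : Int × Int × (List (Int × Int)) := (3, 1, [(2, 2), (1, 1)])

def Spec_group_bag_limited (n : Int) (d : Int) (nums : List (Int × Int)) (out : Int) : Prop := out = group_bag_limited_alt n d nums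
instance (n : Int) (d : Int) (nums : List (Int × Int)) (out : Int) : Decidable (Spec_group_bag_limited n d nums out) := by unfold Spec_group_bag_limited; infer_instance

-- ===== CLAIM (what is proved, stated in full; the proofs are below) =====
def Claim_equal_group_bag_limited : Prop := ∀ (n : Int) (d : Int) (nums : List (Int × Int)), Dom_group_bag_limited n d nums → Pre_group_bag_limited n d nums → Spec_group_bag_limited n d nums (group_bag_limited n d nums)

-- ===== LEMMAS AND PROOFS =====

-- omin/olt/oadd algebra
theorem omin_none_right (a : Option Int) : omin a none = a := by cases a <;> rfl
theorem omin_assoc (a b c : Option Int) : omin (omin a b) c = omin a (omin b c) := by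
  cases a <;> cases b <;> cases c <;> simp [omin, min_assoc]
theorem omin_comm (a b : Option Int) : omin a b = omin b a := by
  cases a <;> cases b <;> simp [omin, min_comm]
theorem olt_min (v c : Option Int) : (if olt v c then v else c) = omin c v := by
  match v, c with
  | none, none => rfl
  | none, some b => rfl
  | some a, none => simp [olt, omin]
  | some a, some b =>
      simp only [olt, omin, decide_eq_true_eq]
      split_ifs with h <;> simp only [Option.some.injEq, min_def] <;> split_ifs <;> omega
theorem oadd_omin (a b : Option Int) (c : Int) :
    oadd (omin a b) c = omin (oadd a c) (oadd b c) := by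
  match a, b with
  | none, none => rfl
  | none, some b => rfl
  | some a, none => rfl
  | some a, some b =>
      simp only [oadd, omin, Option.map_some, Option.some.injEq, min_def]
      split_ifs <;> omega

theorem foldl_omin_init (l : List (Option Int)) (a : Option Int) :
    l.foldl omin a = omin a (l.foldl omin none) := by
  induction l generalizing a with
  | nil => simp [List.foldl, omin_none_right]
  | cons x t ih =>
      simp only [List.foldl]
      rw [ih (omin a x), ih (omin none x), omin_assoc]
      rfl

-- min of (fun j => f j) over the integer interval [lo, hi)
def IMin (f : Int → Option Int) (lo hi : Int) : Option Int :=
  ((PySem.List.pyRange lo hi 1).map f).foldl omin none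

theorem IMin_nil (f : Int → Option Int) {lo hi : Int} (h : hi ≤ lo) : IMin f lo hi = none := by
  simp [IMin, PySem.List.pyRange_one_eq_nil h]
theorem IMin_succ_right (f : Int → Option Int) {lo hi : Int} (h : lo ≤ hi) :
    IMin f lo (hi + 1) = omin (IMin f lo hi) (f hi) := by
  rw [IMin, PySem.List.pyRange_one_succ_right h]
  simp [IMin, List.foldl_append]
theorem IMin_cons (f : Int → Option Int) {lo hi : Int} (h : lo < hi) :
    IMin f lo hi = omin (f lo) (IMin f (lo + 1) hi) := by
  rw [IMin, PySem.List.pyRange_one_cons h]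
  simp only [List.map_cons, List.foldl_cons]
  rw [foldl_omin_init]
  rfl
theorem IMin_singleton (f : Int → Option Int) (lo : Int) : IMin f lo (lo + 1) = f lo := by
  rw [IMin_cons f (by omega), IMin_nil f (by omega), omin_none_right]
theorem IMin_append (f : Int → Option Int) {lo mid hi : Int} (h1 : lo ≤ mid) (h2 : mid ≤ hi) :
    IMin f lo hi = omin (IMin f lo mid) (IMin f mid hi) := by
  rw [IMin, PySem.List.pyRange_one_append lo mid hi h1 h2, List.map_append, List.foldl_append,
    foldl_omin_init]
  rfl
theorem IMin_congr {f g : Int → Option Int} {lo hi : Int}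
    (h : ∀ j, lo ≤ j → j < hi → f j = g j) : IMin f lo hi = IMin g lo hi := by
  unfold IMin
  congr 1
  apply List.map_congr_left
  intro j hj
  rw [PySem.List.mem_pyRange_one] at hj
  exact h j hj.1 hj.2
theorem IMin_oadd (f : Int → Option Int) (c : Int) (lo hi : Int) :
    IMin (fun x => oadd (f x) c) lo hi = oadd (IMin f lo hi) c := by
  by_cases h : hi ≤ lo
  · rw [IMin_nil _ h, IMin_nil _ h]; rfl
  · rw [not_le] at h
    generalize hE : (hi - lo).toNat = k
    induction k generalizing hi with
    | zero => omega
    | succ k ih =>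
        have hlo : lo ≤ hi - 1 := by omega
        have hhi : hi = (hi - 1) + 1 := by omega
        rw [hhi, IMin_succ_right _ hlo, IMin_succ_right _ hlo, oadd_omin]
        by_cases h2 : hi - 1 ≤ lo
        · rw [IMin_nil _ h2, IMin_nil _ h2]; rfl
        · rw [ih (hi - 1) (by omega) (by omega)]
theorem IMin_reindex (f : Int → Option Int) (c : Int) (lo hi : Int) :
    IMin (fun x => f (c - x)) lo hi = IMin f (c - hi + 1) (c - lo + 1) := by
  by_cases h : hi ≤ lo
  · rw [IMin_nil _ h, IMin_nil _ (by omega)]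
  · rw [not_le] at h
    generalize hE : (hi - lo).toNat = k
    induction k generalizing lo with
    | zero => omega
    | succ k ih =>
        rw [IMin_cons _ h]
        have h2 : c - hi + 1 ≤ c - lo := by omega
        have h3 : c - lo + 1 = (c - lo) + 1 := by omega
        rw [h3, IMin_succ_right f h2]
        by_cases h4 : hi ≤ lo + 1
        · have : hi = lo + 1 := by omega
          subst this
          rw [IMin_nil _ (by omega), IMin_nil _ (by omega), omin_comm]
        · rw [ih (lo + 1) (by omega) (by omega), omin_comm]
          congr 2
          omega

-- ogd basics
theorem ogd_natCast (xs : List (Option Int)) (m : Nat) (h : m < xs.length) :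
    ogd xs (m : Int) = xs[m] := by
  rw [ogd, PySem.List.pyGetD_natCast, List.getD_eq_getElem?_getD, List.getElem?_eq_getElem h]
  rfl
theorem ogd_out (xs : List (Option Int)) (i : Int) (h : (xs.length : Int) ≤ i) :
    ogd xs i = none := by
  have h0 : 0 ≤ i := by omega
  rw [ogd, ← Int.toNat_of_nonneg h0, PySem.List.pyGetD_natCast,
    List.getD_eq_default _ _ (by omega)]
theorem ogd_pySetD (cur : List (Option Int)) (t : Int) (v : Option Int)
    (ht0 : 0 ≤ t) (ht : t < (cur.length : Int)) (i : Int) (hi : 0 ≤ i) :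
    ogd (PySem.List.pySetD cur t v) i = if i = t then v else ogd cur i := by
  rw [← Int.toNat_of_nonneg ht0, ← Int.toNat_of_nonneg hi, ogd, ogd,
    PySem.List.pySetD_natCast, PySem.List.pyGetD_natCast, PySem.List.pyGetD_natCast]
  rcases eq_or_ne i.toNat t.toNat with hEq | hNe
  · rw [if_pos (by omega), hEq, List.getD_eq_getElem?_getD,
      List.getElem?_set_self (by omega)]
    rfl
  · rw [if_neg (by omega), List.getD_eq_getElem?_getD, List.getElem?_set_ne (by omega),
      List.getD_eq_getElem?_getD]

-- emod toolkit (z > 0)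
theorem emod_shift (z q s : Int) (h0 : 0 ≤ s) (h1 : s < z) : (z * q + s) % z = s := by
  rw [add_comm, Int.add_mul_emod_self_left, Int.emod_eq_of_lt h0 h1]

-- ===== A-side characterization =====
def relaxStep (pre : List (Option Int)) (x cost : Int) (cur : List (Option Int)) (i : Int) :
    List (Option Int) :=
  let v := oadd (ogd pre (i - x)) cost
  if olt v (ogd cur i) then PySem.List.pySetD cur i v else cur

theorem relaxStep_ogd (pre : List (Option Int)) (x cost t : Int) (cur : List (Option Int))
    (ht0 : 0 ≤ t) (ht : t < (cur.length : Int)) (i : Int) (hi : 0 ≤ i) :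
    ogd (relaxStep pre x cost cur t) i =
      if i = t then omin (ogd cur t) (oadd (ogd pre (t - x)) cost) else ogd cur i := by
  have hkey := olt_min (oadd (ogd pre (t - x)) cost) (ogd cur t)
  simp only [relaxStep]
  by_cases h : olt (oadd (ogd pre (t - x)) cost) (ogd cur t) = true
  · rw [if_pos h] at hkey
    rw [if_pos h, ogd_pySetD cur t _ ht0 ht i hi]
    rcases eq_or_ne i t with hEq | hNe
    · rw [if_pos hEq, if_pos hEq, ← hkey]
    · rw [if_neg hNe, if_neg hNe]
  · rw [if_neg h] at hkey
    rw [if_neg h]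
    rcases eq_or_ne i t with hEq | hNe
    · rw [if_pos hEq, hEq]; exact hkey
    · rw [if_neg hNe]

theorem relaxStep_length (pre : List (Option Int)) (x cost t : Int) (cur : List (Option Int)) :
    (relaxStep pre x cost cur t).length = cur.length := by
  rw [relaxStep]
  split_ifs
  · exact PySem.List.length_pySetD ..
  · rfl

theorem A_inner (pre : List (Option Int)) (x cost n : Int) (hx : 1 ≤ x) (hn : 0 ≤ n) :
    ∀ (k : Nat) (t : Int) (cur : List (Option Int)), (t - x + 1).toNat = k → t ≤ n →
    cur.length = (n + 1).toNat →
    ((PySem.List.pyRange t (x - 1) (-1)).foldl (relaxStep pre x cost) cur).length = (n + 1).toNat ∧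
    ∀ i : Int, 0 ≤ i →
      ogd ((PySem.List.pyRange t (x - 1) (-1)).foldl (relaxStep pre x cost) cur) i =
        if x ≤ i ∧ i ≤ t then omin (ogd cur i) (oadd (ogd pre (i - x)) cost) else ogd cur i := by
  intro k
  induction k with
  | zero =>
      intro t cur hk ht hlen
      have hnil : t ≤ x - 1 := by omega
      rw [PySem.List.pyRange_neg_one_eq_nil hnil]
      refine ⟨hlen, fun i hi => ?_⟩
      rw [List.foldl_nil, if_neg (by omega)]
  | succ k ih =>
      intro t cur hk ht hlen
      have hlt : x - 1 < t := by omega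
      rw [PySem.List.pyRange_neg_one_cons hlt, List.foldl_cons]
      have hlen' : (relaxStep pre x cost cur t).length = (n + 1).toNat := by
        rw [relaxStep_length, hlen]
      obtain ⟨ihl, ihv⟩ := ih (t - 1) (relaxStep pre x cost cur t) (by omega) (by omega) hlen'
      refine ⟨ihl, fun i hi => ?_⟩
      rw [ihv i hi]
      have hts : t < (cur.length : Int) := by omega
      rcases eq_or_ne i t with hEq | hNe
      · subst hEq
        rw [if_neg (by omega), relaxStep_ogd pre x cost i cur (by omega) hts i hi,
          if_pos rfl, if_pos ⟨by omega, le_refl i⟩]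
      · rw [relaxStep_ogd pre x cost t cur (by omega) hts i hi, if_neg hNe]
        have hiff : (x ≤ i ∧ i ≤ t - 1) ↔ (x ≤ i ∧ i ≤ t) := by omega
        simp only [hiff]

-- value of A's row after processing copy counts 1..m of item (r, z)
def AVal (pre : List (Option Int)) (r d m j : Int) : Option Int :=
  omin (ogd pre j) (IMin (fun x => oadd (ogd pre (j - x)) (d + x * r)) 1 (min (m + 1) (j + 1)))

theorem A_group (pre : List (Option Int)) (r d n : Int) (hn : 0 ≤ n)
    (hlen : pre.length = (n + 1).toNat) :
    ∀ (mN : Nat) (m : Int), m = (mN : Int) →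
    (((PySem.List.pyRange 1 (m + 1) 1).foldl
        (fun cur x => (PySem.List.pyRange n (x - 1) (-1)).foldl (relaxStep pre x (d + x * r)) cur)
        pre).length = (n + 1).toNat) ∧
    ∀ j : Int, 0 ≤ j →
      ogd ((PySem.List.pyRange 1 (m + 1) 1).foldl
        (fun cur x => (PySem.List.pyRange n (x - 1) (-1)).foldl (relaxStep pre x (d + x * r)) cur)
        pre) j = if j ≤ n then AVal pre r d m j else none := by
  intro mN
  induction mN with
  | zero =>
      intro m hm
      have hm0 : m = 0 := by exact_mod_cast hm
      subst hm0
      rw [PySem.List.pyRange_one_eq_nil (by omega)]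
      refine ⟨hlen, fun j hj => ?_⟩
      rw [List.foldl_nil]
      rcases le_or_gt j n with hjn | hjn
      · rw [if_pos hjn, AVal, IMin_nil _ (by omega), omin_none_right]
      · rw [if_neg (by omega), ogd_out _ _ (by omega)]
  | succ k ih =>
      intro m hm
      have hm1 : 1 ≤ m := by omega
      obtain ⟨ihl, ihv⟩ := ih (m - 1) (by omega)
      rw [show m - 1 + 1 = m from by ring] at ihl ihv
      rw [PySem.List.pyRange_one_succ_right hm1, List.foldl_append]
      simp only [List.foldl_cons, List.foldl_nil]
      obtain ⟨al, av⟩ := A_inner pre m (d + m * r) n hm1 hn (n - m + 1).toNat n _ rfl (le_refl n) ihl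
      refine ⟨al, fun j hj => ?_⟩
      rw [av j hj]
      rcases le_or_gt j n with hjn | hjn
      · rcases le_or_gt m j with hmj | hmj
        · rw [if_pos ⟨hmj, hjn⟩, ihv j hj, if_pos hjn, if_pos hjn]
          rw [AVal, AVal, min_eq_left (by omega), min_eq_left (by omega),
            show m - 1 + 1 = m from by ring, IMin_succ_right _ hm1, ← omin_assoc]
        · rw [if_neg (by omega), ihv j hj, if_pos hjn, if_pos hjn, AVal, AVal,
            min_eq_right (by omega), min_eq_right (by omega)]
      · rw [if_neg (by omega), ihv j hj, if_neg (by omega), if_neg (by omega)]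

-- window form of AVal (the key reparametrization x ↦ j - x)
theorem AVal_window (pre : List (Option Int)) (r d z j : Int) (hz : 1 ≤ z) (hj : 0 ≤ j) :
    AVal pre r d z j =
      omin (ogd pre j)
        (oadd (IMin (fun t => osub (ogd pre t) (t * r)) (max 0 (j - z)) j) (d + j * r)) := by
  rw [AVal]
  congr 1
  rw [IMin_congr (g := fun x => oadd ((fun t => osub (ogd pre t) (t * r)) (j - x)) (d + j * r))
    (fun x _ _ => by
      show oadd (ogd pre (j - x)) (d + x * r) = oadd (osub (ogd pre (j - x)) ((j - x) * r)) (d + j * r)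
      cases ogd pre (j - x) with
      | none => rfl
      | some v => simp only [oadd, osub, Option.map_some, Option.some.injEq]; ring)]
  rw [IMin_oadd (fun x => (fun t => osub (ogd pre t) (t * r)) (j - x)) (d + j * r),
    IMin_reindex (fun t => osub (ogd pre t) (t * r)) j 1 (min (z + 1) (j + 1)),
    show j - min (z + 1) (j + 1) + 1 = max 0 (j - z) from by omega,
    show j - 1 + 1 = j from by ring]

-- ===== B-side characterization =====
def kf (pre : List (Option Int)) (r t : Int) : Option Int := osub (ogd pre t) (t * r)
-- start of j's block of size z
def Bs (z j : Int) : Int := j - j % z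
-- block prefix minimum ending at j / block suffix minimum starting at j (truncated at n)
def PMin (pre : List (Option Int)) (r z j : Int) : Option Int :=
  IMin (kf pre r) (Bs z j) (j + 1)
def SMin (pre : List (Option Int)) (r z n j : Int) : Option Int :=
  IMin (kf pre r) j (min (Bs z j + z) n)

theorem emod_nonneg' (z a : Int) (hz : 0 < z) : 0 ≤ a % z := Int.emod_nonneg a (by omega)
theorem emod_lt' (z a : Int) (hz : 0 < z) : a % z < z := Int.emod_lt_of_pos a hz

theorem emod_pred (z a : Int) (hz : 0 < z) (h : a % z ≠ 0) : (a - 1) % z = a % z - 1 := by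
  have hd := Int.ediv_add_emod a z
  have hb1 := emod_nonneg' z a hz
  have hb2 := emod_lt' z a hz
  rw [show a - 1 = z * (a / z) + (a % z - 1) from by omega,
    emod_shift z (a / z) (a % z - 1) (by omega) (by omega)]

theorem emod_succ_eq (z a : Int) (hz : 0 < z) (h : (a + 1) % z = 0) : a % z = z - 1 := by
  have hd := Int.ediv_add_emod a z
  have hb1 := emod_nonneg' z a hz
  have hb2 := emod_lt' z a hz
  by_contra hne
  rw [show a + 1 = z * (a / z) + (a % z + 1) from by omega,
    emod_shift z (a / z) (a % z + 1) (by omega) (by omega)] at h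
  omega

theorem emod_succ_ne (z a : Int) (hz : 0 < z) (h : (a + 1) % z ≠ 0) :
    (a + 1) % z = a % z + 1 := by
  have hd := Int.ediv_add_emod a z
  have hb1 := emod_nonneg' z a hz
  have hb2 := emod_lt' z a hz
  rcases eq_or_ne (a % z) (z - 1) with he | hne
  · exfalso
    have hm : z * (a / z + 1) = z * (a / z) + z := by ring
    rw [show a + 1 = z * (a / z + 1) + 0 from by omega,
      emod_shift z (a / z + 1) 0 (by omega) (by omega)] at h
    exact h rfl
  · rw [show a + 1 = z * (a / z) + (a % z + 1) from by omega,
      emod_shift z (a / z) (a % z + 1) (by omega) (by omega)]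

theorem ogd_append_neg_one (l : List (Option Int)) (x : Option Int) : ogd (l ++ [x]) (-1) = x :=
  PySem.List.pyGetD_neg_one_append_singleton ..

theorem B_premin (pre : List (Option Int)) (r z n : Int) (key : List (Option Int)) (hz : 0 < z)
    (hkey : ∀ j : Int, 0 ≤ j → j < n → ogd key j = kf pre r j) :
    ∀ (mN : Nat) (m : Int), m = (mN : Int) → m ≤ n →
    (PySem.List.pyRange 0 m 1).foldl
      (fun acc j => if PySem.Int.mod j z == 0 then acc ++ [ogd key j]
                    else acc ++ [omin (ogd acc (-1)) (ogd key j)]) [] =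
    (PySem.List.pyRange 0 m 1).map (fun j => PMin pre r z j) := by
  intro mN
  induction mN with
  | zero =>
      intro m hm hmn
      have hm0 : m = 0 := by exact_mod_cast hm
      subst hm0
      rw [PySem.List.pyRange_one_eq_nil (by omega)]
      rfl
  | succ k ih =>
      intro m hm hmn
      have hm1 : 1 ≤ m := by omega
      have hih := ih (m - 1) (by omega) (by omega)
      rw [show m = (m - 1) + 1 from by ring, PySem.List.pyRange_one_succ_right (by omega),
        List.foldl_append, List.map_append, hih]
      simp only [List.foldl_cons, List.foldl_nil, List.map_cons, List.map_nil]
      rw [PySem.Int.mod_eq_emod_of_pos hz]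
      have hb1 := emod_nonneg' z (m - 1) hz
      have hb2 := emod_lt' z (m - 1) hz
      rcases eq_or_ne ((m - 1) % z) 0 with h0 | h0
      · rw [if_pos (by simp [h0]), hkey (m - 1) (by omega) (by omega)]
        have : PMin pre r z (m - 1) = kf pre r (m - 1) := by
          rw [PMin, show Bs z (m - 1) = m - 1 from by rw [Bs, h0]; ring, IMin_singleton]
        rw [this]
      · rw [if_neg (by simp [h0])]
        have hm2 : 1 ≤ m - 1 := by
          rcases eq_or_ne m 1 with h1 | h1
        -- m - 1 = 0 would give (m-1) % z = 0
          · exfalso; rw [h1] at h0; simp at h0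
          · omega
        have hsplit : PySem.List.pyRange 0 (m - 1) 1 =
            PySem.List.pyRange 0 (m - 2) 1 ++ [m - 2] := by
          rw [show m - 1 = (m - 2) + 1 from by ring, PySem.List.pyRange_one_succ_right (by omega)]
        rw [hkey (m - 1) (by omega) (by omega), hsplit, List.map_append, List.map_cons,
          List.map_nil, ogd_append_neg_one]
        have hBs : Bs z (m - 2) = Bs z (m - 1) := by
          have := emod_pred z (m - 1) hz h0
          rw [Bs, Bs, show m - 2 = (m - 1) - 1 from by ring, this]
          ring
        have : PMin pre r z (m - 1) = omin (PMin pre r z (m - 2)) (kf pre r (m - 1)) := by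
          rw [PMin, PMin, hBs, show m - 2 + 1 = m - 1 from by ring,
            IMin_succ_right _ (show Bs z (m - 1) ≤ m - 1 from by rw [Bs]; omega)]
        rw [this]

theorem B_suf (pre : List (Option Int)) (r z n : Int) (key : List (Option Int)) (hz : 0 < z)
    (hn : 0 ≤ n)
    (hkey : ∀ j : Int, 0 ≤ j → j < n → ogd key j = kf pre r j) :
    ∀ (kN : Nat) (m : Int), (n - m).toNat = kN → 0 ≤ m → m ≤ n →
    (PySem.List.pyRange (n - 1) (m - 1) (-1)).foldl
      (fun acc j => if (j == n - 1) || (PySem.Int.mod (j + 1) z == 0) then acc ++ [ogd key j]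
                    else acc ++ [omin (ogd acc (-1)) (ogd key j)]) [] =
    ((PySem.List.pyRange m n 1).map (fun j => SMin pre r z n j)).reverse := by
  intro kN
  induction kN with
  | zero =>
      intro m hk h0 hmn
      have : m = n := by omega
      subst this
      rw [PySem.List.pyRange_neg_one_eq_nil (by omega), PySem.List.pyRange_one_eq_nil (by omega)]
      rfl
  | succ k ih =>
      intro m hk h0 hmn
      have hmn' : m < n := by omega
      have hih := ih (m + 1) (by omega) (by omega) (by omega)
      rw [PySem.List.pyRange_neg_one_eq_reverse, show m - 1 + 1 = m from by ring,
        show n - 1 + 1 = n from by ring, PySem.List.pyRange_one_cons hmn',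
        List.reverse_cons, List.foldl_append,
        show (PySem.List.pyRange (m + 1) n 1).reverse =
          PySem.List.pyRange (n - 1) ((m + 1) - 1) (-1) from by
            rw [PySem.List.pyRange_neg_one_eq_reverse, show (m + 1) - 1 + 1 = m + 1 from by ring,
              show n - 1 + 1 = n from by ring],
        hih]
      simp only [List.foldl_cons, List.foldl_nil, List.map_cons]
      rw [List.reverse_cons]
      have hb1 := emod_nonneg' z m hz
      have hb2 := emod_lt' z m hz
      by_cases hc : m = n - 1 ∨ (m + 1) % z = 0
      · have hcond : ((m == n - 1) || (PySem.Int.mod (m + 1) z == 0)) = true := by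
          rw [PySem.Int.mod_eq_emod_of_pos hz]
          rcases hc with h | h <;> simp [h]
        rw [hcond, if_pos rfl, hkey m h0 (by omega)]
        have : SMin pre r z n m = kf pre r m := by
          have hup : min (Bs z m + z) n = m + 1 := by
            rcases hc with h | h
            · rw [Bs]; omega
            · have := emod_succ_eq z m hz h
              rw [Bs]; omega
          rw [SMin, hup, IMin_singleton]
        rw [this]
      · rw [not_or] at hc
        obtain ⟨hc1, hc2⟩ := hc
        have hcond : ((m == n - 1) || (PySem.Int.mod (m + 1) z == 0)) = false := by
          rw [PySem.Int.mod_eq_emod_of_pos hz]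
          simp [hc1, hc2]
        rw [hcond, if_neg (by simp)]
        have hsplit : PySem.List.pyRange (m + 1) n 1 =
            (m + 1) :: PySem.List.pyRange (m + 2) n 1 := by
          rw [PySem.List.pyRange_one_cons (by omega), show m + 1 + 1 = m + 2 from by ring]
        rw [hkey m h0 (by omega), hsplit, List.map_cons, List.reverse_cons, ogd_append_neg_one]
        have hBs : Bs z (m + 1) = Bs z m := by
          have := emod_succ_ne z m hz hc2
          rw [Bs, Bs, this]; ring
        have : SMin pre r z n m = omin (SMin pre r z n (m + 1)) (kf pre r m) := by
          rw [SMin, SMin, hBs, IMin_cons _ (show m < min (Bs z m + z) n from by rw [Bs]; omega),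
            omin_comm]
        rw [this]

-- ===== window combination and item-level equalities =====
theorem window_combine (pre : List (Option Int)) (r z n i : Int) (hz : 0 < z)
    (h1 : 1 ≤ i) (hn : i ≤ n) :
    (if PySem.Int.mod (if z < i then i - z else 0) z == 0
     then PMin pre r z (i - 1)
     else omin (SMin pre r z n (if z < i then i - z else 0)) (PMin pre r z (i - 1))) =
    IMin (kf pre r) (max 0 (i - z)) i := by
  set l := if z < i then i - z else 0 with hl
  have hleq : l = max 0 (i - z) := by rw [hl]; split_ifs <;> omega
  rw [PySem.Int.mod_eq_emod_of_pos hz]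
  have hb1 := emod_nonneg' z l hz
  have hb2 := emod_lt' z l hz
  have hdl := Int.ediv_add_emod l z
  have hbounds : 0 ≤ l ∧ l ≤ i - 1 ∧ i - l ≤ z := by rw [hl]; split_ifs <;> omega
  by_cases h0 : l % z = 0
  · rw [if_pos (by simp [h0])]
    have h' : (z * (l / z) + (i - 1 - l)) % z = i - 1 - l :=
      emod_shift z (l / z) (i - 1 - l) (by omega) (by omega)
    have hBs : Bs z (i - 1) = l := by
      rw [Bs, show (i - 1) % z = i - 1 - l from by rw [← h']; congr 1; omega]
      ring
    rw [PMin, hBs, hleq, show i - 1 + 1 = i from by ring]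
  · rw [if_neg (by simp [h0])]
    have hlz : l = i - z := by
      rcases (show l = 0 ∨ l = i - z from by rw [hl]; split_ifs <;> simp) with h | h
      · exfalso; rw [h] at h0; simp at h0
      · exact h
    have hup : min (Bs z l + z) n = Bs z l + z := by rw [Bs]; omega
    have h'' : (z * (l / z + 1) + (l % z - 1)) % z = l % z - 1 :=
      emod_shift z (l / z + 1) (l % z - 1) (by omega) (by omega)
    have hmul : z * (l / z + 1) = z * (l / z) + z := by ring
    have hBsi : Bs z (i - 1) = Bs z l + z := by
      rw [Bs, Bs, show (i - 1) % z = l % z - 1 from by rw [← h'']; congr 1; omega]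
      omega
    rw [SMin, hup, PMin, hBsi, show i - 1 + 1 = i from by ring,
      ← IMin_append (kf pre r) (show l ≤ Bs z l + z from by rw [Bs]; omega)
        (show Bs z l + z ≤ i from by rw [Bs]; omega), hleq]

-- the row both A and B compute for one item (r, z) with z > 0
def valList (pre : List (Option Int)) (r z d n : Int) : List (Option Int) :=
  ogd pre 0 :: (PySem.List.pyRange 1 (n + 1) 1).map (fun j =>
    omin (ogd pre j) (oadd (IMin (kf pre r) (max 0 (j - z)) j) (d + j * r)))

theorem valList_length (pre : List (Option Int)) (r z d n : Int) (hn : 0 ≤ n) :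
    (valList pre r z d n).length = (n + 1).toNat := by
  rw [valList]
  simp only [List.length_cons, List.length_map, PySem.List.length_pyRange_one]
  omega

theorem A_item_eq (pre : List (Option Int)) (z d n : Int) (r : Int) (hz : 0 < z) (hn : 0 ≤ n)
    (hlen : pre.length = (n + 1).toNat) :
    itemA n d pre (r, z) = valList pre r z d n := by
  show (PySem.List.pyRange 1 (z + 1) 1).foldl
    (fun cur x => (PySem.List.pyRange n (x - 1) (-1)).foldl (relaxStep pre x (d + x * r)) cur)
    pre = valList pre r z d n
  obtain ⟨al, av⟩ := A_group pre r d n hn hlen z.toNat z (by omega)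
  apply List.ext_getElem
  · rw [al, valList_length pre r z d n hn]
  · intro mN h1 h2
    rw [al] at h1
    rw [← ogd_natCast _ mN (by rw [al]; exact h1)]
    cases mN with
    | zero =>
        have hav := av ((0 : Nat) : Int) (by positivity)
        rw [if_pos (by omega)] at hav
        rw [hav, show (((0 : Nat) : Int)) = (0 : Int) from by norm_num, AVal,
          IMin_nil _ (by omega), omin_none_right]
        rfl
    | succ t =>
        have hav := av ((t : Int) + 1) (by positivity)
        rw [if_pos (by omega)] at hav
        rw [show (((t + 1 : Nat)) : Int) = (t : Int) + 1 from by push_cast; ring, hav,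
          AVal_window pre r d z ((t : Int) + 1) (by omega) (by positivity)]
        simp only [valList, List.getElem_cons_succ, List.getElem_map,
          PySem.List.getElem_pyRange_one]
        rw [show (1 : Int) + (t : Int) = (t : Int) + 1 from by ring]
        rfl

theorem B_item_core (pre premin sufmin : List (Option Int)) (r z d n : Int) (hz : 0 < z)
    (hn : 0 ≤ n)
    (hpremin : ∀ j : Int, 0 ≤ j → j < n → ogd premin j = PMin pre r z j)
    (hsufmin : ∀ j : Int, 0 ≤ j → j < n → ogd sufmin j = SMin pre r z n j) :
    (PySem.List.pyRange 1 (n + 1) 1).foldl (fun acc i =>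
      acc ++ [omin (ogd pre i)
        (oadd (if PySem.Int.mod (if z < i then i - z else 0) z == 0
               then ogd premin (i - 1)
               else omin (ogd sufmin (if z < i then i - z else 0)) (ogd premin (i - 1)))
          (d + i * r))]) [ogd pre 0] = valList pre r z d n := by
  rw [PySem.List.foldl_append_singleton_eq_map, List.singleton_append, valList]
  congr 1
  apply List.map_congr_left
  intro i hi
  rw [PySem.List.mem_pyRange_one] at hi
  have hl0 : 0 ≤ (if z < i then i - z else 0) := by split_ifs <;> omega
  have hl1 : (if z < i then i - z else 0) < n := by split_ifs <;> omega
  rw [hpremin (i - 1) (by omega) (by omega), hsufmin _ hl0 hl1,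
    window_combine pre r z n i hz (by omega) (by omega)]

theorem ogd_map_kf (pre : List (Option Int)) (r n j : Int) (h0 : 0 ≤ j) (h1 : j < n) :
    ogd ((PySem.List.pyRange 0 n 1).map (fun j => osub (ogd pre j) (j * r))) j = kf pre r j :=
  PySem.List.pyGetD_map_pyRange_of_nonneg _ n j none h0 h1

theorem B_item_eq (pre : List (Option Int)) (z d n : Int) (r : Int) (hz : 0 < z) (hn : 0 ≤ n) :
    itemB n d pre (r, z) = valList pre r z d n := by
  have hkey : ∀ j : Int, 0 ≤ j → j < n →
      ogd ((PySem.List.pyRange 0 n 1).map (fun j => osub (ogd pre j) (j * r))) j = kf pre r j :=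
    fun j h0 h1 => ogd_map_kf pre r n j h0 h1
  have hpre := B_premin pre r z n _ hz hkey n.toNat n (by omega) le_rfl
  have hsuf := B_suf pre r z n _ hz hn hkey (n - 0).toNat 0 rfl le_rfl hn
  rw [show (0 : Int) - 1 = -1 from by ring] at hsuf
  simp only [itemB]
  rw [if_neg (by omega), hpre, hsuf, List.reverse_reverse]
  apply B_item_core pre _ _ r z d n hz hn
  · intro j h0 h1
    exact PySem.List.pyGetD_map_pyRange_of_nonneg _ n j none h0 h1
  · intro j h0 h1
    exact PySem.List.pyGetD_map_pyRange_of_nonneg _ n j none h0 h1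

theorem A_item_trivial (pre : List (Option Int)) (n d : Int) (rz : Int × Int) (hz : rz.2 ≤ 0) :
    itemA n d pre rz = pre := by
  rw [itemA, PySem.List.pyRange_one_eq_nil (by omega), List.foldl_nil]

theorem fold_eq (n d : Int) (hn : 0 ≤ n) :
    ∀ (nums : List (Int × Int)) (pre : List (Option Int)), pre.length = (n + 1).toNat →
    nums.foldl (itemA n d) pre = nums.foldl (itemB n d) pre ∧
    (nums.foldl (itemB n d) pre).length = (n + 1).toNat := by
  intro nums
  induction nums with
  | nil => exact fun pre hlen => ⟨rfl, hlen⟩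
  | cons rz rest ih =>
      intro pre hlen
      simp only [List.foldl_cons]
      rcases le_or_gt rz.2 0 with hz | hz
      · rw [A_item_trivial pre n d rz hz, show itemB n d pre rz = pre from by
          rw [itemB]; simp only []; rw [if_pos hz]]
        exact ih pre hlen
      · have hA : itemA n d pre rz = valList pre rz.1 rz.2 d n := by
          rw [show rz = (rz.1, rz.2) from rfl]
          exact A_item_eq pre rz.2 d n rz.1 hz hn hlen
        have hB : itemB n d pre rz = valList pre rz.1 rz.2 d n := by
          rw [show rz = (rz.1, rz.2) from rfl]
          exact B_item_eq pre rz.2 d n rz.1 hz hn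
        rw [hA, hB]
        exact ih _ (valList_length pre rz.1 rz.2 d n hn)

-- ===== VERDICT (by name: the statement is the Claim_ definition above) =====
theorem group_bag_limited_spec : Claim_equal_group_bag_limited := by
  intro n d nums hdom hpre
  unfold Spec_group_bag_limited
  have hn : 0 ≤ n := hpre
  have hlen0 : (PySem.List.pySetD (List.replicate (n + 1).toNat (none : Option Int)) 0
      (some 0)).length = (n + 1).toNat := by
    rw [PySem.List.length_pySetD, List.length_replicate]
  obtain ⟨heq, _⟩ := fold_eq n d hn nums _ hlen0
  simp only [group_bag_limited, group_bag_limited_alt]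
  rw [heq]
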